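-- pv_equiv track=rewrite | github.com/tanyxom/project_01 | lvl_2/task_2.2.py | quarter_of
-- ===== SOURCE A (Python) =====
-- def quarter_of(month):
--     quarter_dictionary = {
--         "месяц 1 (январь) является частью первого квартала" : [1],
--         "месяц 2 (февраль) является частью первого квартала" : [2],
--         "месяц 3 (март) является частью первого квартала" : [3],
--         "месяц 4 (апрель) является частью второго квартала" : [4],
--         "месяц 5 (май) является частью второго квартала" : [5],
--         "месяц 6 (июнь) является частью второго квартала" : [6],
--         "месяц 7 (июль) является частью третьего квартала" : [7],
--         "месяц 8 (август) является частью третьего квартала" : [8],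
--         "месяц 9 (сентябрь) является частью третьего квартала" : [9],
--         "месяц 10 (октябрь) является частью четвертого квартала" : [10],
--         "месяц 11 (ноябрь) является частью четвертого квартала" : [11],
--         "месяц 12 (декабрь) является частью четвертого квартала" : [12]
--     }
--
--     for key,values in quarter_dictionary.items():
--         for value in values:
--             if value == month:
--                 return key
-- ===== SOURCE B (Python) =====
-- MONTHS = ["январь", "февраль", "март", "апрель", "май", "июнь",
--           "июль", "август", "сентябрь", "октябрь", "ноябрь", "декабрь"]
-- QUARTERS = ["первого", "второго", "третьего", "четвертого"]
--
--
-- def quarter_of(month):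
--     if month in range(1, 13):
--         return (f"месяц {month} ({MONTHS[month - 1]}) является частью "
--                 f"{QUARTERS[(month - 1) // 3]} квартала")
--     return None
-- ===== Notes on version B (the rewrite author's own statement) =====
-- stated objective: simpler
-- what changed: Replaced A's scan over a dictionary mapping each full sentence to its month number by a direct range test plus arithmetic construction of the sentence from parallel month-name and quarter-word tables.
import Mathlib
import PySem

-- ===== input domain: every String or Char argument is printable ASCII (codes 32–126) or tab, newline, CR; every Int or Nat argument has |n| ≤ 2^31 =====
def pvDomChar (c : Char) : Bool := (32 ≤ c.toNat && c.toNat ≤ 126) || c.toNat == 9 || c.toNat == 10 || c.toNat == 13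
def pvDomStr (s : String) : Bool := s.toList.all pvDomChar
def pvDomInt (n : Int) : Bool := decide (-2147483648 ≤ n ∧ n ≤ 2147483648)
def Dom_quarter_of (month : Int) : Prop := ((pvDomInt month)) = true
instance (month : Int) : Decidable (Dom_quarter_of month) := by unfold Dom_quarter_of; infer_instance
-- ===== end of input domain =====

-- B replaces A's 12-entry sentence→[month] dictionary scan by a direct range test and
-- arithmetic construction of the sentence from month-name/quarter-word tables (objective: simpler).

-- ===== PORT A =====
-- A's dict literal: sentence keys, singleton month lists as values, in insertion order.
def quarterDict : List (String × List Int) :=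
  [ ("месяц 1 (январь) является частью первого квартала", [1])
  , ("месяц 2 (февраль) является частью первого квартала", [2])
  , ("месяц 3 (март) является частью первого квартала", [3])
  , ("месяц 4 (апрель) является частью второго квартала", [4])
  , ("месяц 5 (май) является частью второго квартала", [5])
  , ("месяц 6 (июнь) является частью второго квартала", [6])
  , ("месяц 7 (июль) является частью третьего квартала", [7])
  , ("месяц 8 (август) является частью третьего квартала", [8])
  , ("месяц 9 (сентябрь) является частью третьего квартала", [9])
  , ("месяц 10 (октябрь) является частью четвертого квартала", [10])
  , ("месяц 11 (ноябрь) является частью четвертого квартала", [11])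
  , ("месяц 12 (декабрь) является частью четвертого квартала", [12])
  ]

-- the 'for key,values … for value in values … return key' loop of A
def quarterScan (month : Int) : List (String × List Int) → Option String
  | [] => none
  | (key, values) :: rest =>
      if values.any (fun value => value == month) then some key
      else quarterScan month rest

def quarter_of (month : Int) : Option String := quarterScan month quarterDict

-- ===== PORT B =====
def pvMONTHS : List String :=
  ["январь", "февраль", "март", "апрель", "май", "июнь",
   "июль", "август", "сентябрь", "октябрь", "ноябрь", "декабрь"]

def pvQUARTERS : List String := ["первого", "второго", "третьего", "четвертого"]

def quarter_of_alt (month : Int) : Option String :=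
  if 1 ≤ month ∧ month ≤ 12 then
    some ("месяц " ++ PySem.Int.toStr month ++ " ("
      ++ (PySem.List.pyGet? pvMONTHS (month - 1)).getD "" ++ ") является частью "
      ++ (PySem.List.pyGet? pvQUARTERS (PySem.Int.floordiv (month - 1) 3)).getD "" ++ " квартала")
  else none

-- ===== PRECONDITION & SPEC =====
def Spec_quarter_of (month : Int) (out : Option String) : Prop := out = quarter_of_alt month
instance (month : Int) (out : Option String) : Decidable (Spec_quarter_of month out) := by unfold Spec_quarter_of; infer_instance

-- ===== CLAIM (what is proved, stated in full; the proofs are below) =====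
def Claim_equal_quarter_of : Prop := ∀ (month : Int), Dom_quarter_of month → Spec_quarter_of month (quarter_of month)

-- ===== LEMMAS AND PROOFS =====

-- ===== VERDICT (by name: the statement is the Claim_ definition above) =====
theorem pvScanNone (m : Int) (l : List (String × List Int))
    (h : ∀ vs ∈ l.map Prod.snd, vs.any (fun v => v == m) = false) :
    quarterScan m l = none := by
  induction l with
  | nil => rfl
  | cons p rest ih =>
      obtain ⟨k, vs⟩ := p
      have hc := h vs (by simp)
      simp only [quarterScan, hc]
      exact ih (fun ws hws => h ws (by simp [hws]))

theorem pvToStr1 : PySem.Int.toStr 1 = "1" := by decide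
theorem pvToStr2 : PySem.Int.toStr 2 = "2" := by decide
theorem pvToStr3 : PySem.Int.toStr 3 = "3" := by decide
theorem pvToStr4 : PySem.Int.toStr 4 = "4" := by decide
theorem pvToStr5 : PySem.Int.toStr 5 = "5" := by decide
theorem pvToStr6 : PySem.Int.toStr 6 = "6" := by decide
theorem pvToStr7 : PySem.Int.toStr 7 = "7" := by decide
theorem pvToStr8 : PySem.Int.toStr 8 = "8" := by decide
theorem pvToStr9 : PySem.Int.toStr 9 = "9" := by decide
theorem pvToStr10 : PySem.Int.toStr 10 = "10" := by decide
theorem pvToStr11 : PySem.Int.toStr 11 = "11" := by decide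
theorem pvToStr12 : PySem.Int.toStr 12 = "12" := by decide

theorem quarter_of_spec : Claim_equal_quarter_of := by
  intro month _
  unfold Spec_quarter_of
  by_cases h : 1 ≤ month ∧ month ≤ 12
  · obtain ⟨h1, h2⟩ := h
    interval_cases month <;>
      simp [quarter_of, quarterDict, quarterScan, quarter_of_alt, pvMONTHS, pvQUARTERS,
        pvToStr1, pvToStr2, pvToStr3, pvToStr4, pvToStr5, pvToStr6, pvToStr7, pvToStr8, pvToStr9, pvToStr10, pvToStr11, pvToStr12,
        PySem.List.pyGet?, PySem.List.pyIdx?]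
  · have hv : quarterDict.map Prod.snd = [[1],[2],[3],[4],[5],[6],[7],[8],[9],[10],[11],[12]] := rfl
    have hA : quarter_of month = none := by
      apply pvScanNone
      intro vs hvs
      rw [hv] at hvs
      fin_cases hvs <;> simp <;> omega
    rw [hA, quarter_of_alt, if_neg h]
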